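-- pv_equiv track=rewrite | github.com/kottinov/website-builder | src/react_agent/builder.py | _camelize_css_key
-- ===== SOURCE A (Python) =====
-- def _camelize_css_key(key: str) -> str:
--     """Convert kebab/underscore CSS keys to camelCase for React inline styles."""
--     if not isinstance(key, str):
--         return key
--     sanitized = key.replace("_", "-")
--     parts = sanitized.split("-")
--     if len(parts) == 1:
--         return key
--     return parts[0] + "".join(part.capitalize() for part in parts[1:] if part)
-- ===== SOURCE B (Python) =====
-- def _camelize_css_key(key: str) -> str:
--     """Convert kebab/underscore CSS keys to camelCase for React inline styles."""
--     if not isinstance(key, str):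
--         return key
--     if "-" not in key and "_" not in key:
--         return key
--     out = []
--     seen_sep = False
--     word_start = False
--     for ch in key:
--         if ch == "-" or ch == "_":
--             seen_sep = True
--             word_start = True
--         elif not seen_sep:
--             out.append(ch)
--         elif word_start:
--             out.append(ch.upper())
--             word_start = False
--         else:
--             out.append(ch.lower())
--     return "".join(out)
-- ===== Notes on version B (the rewrite author's own statement) =====
-- stated objective: alternative
-- what changed: Replaced A's replace/split/capitalize/join pipeline over intermediate lists by a single left-to-right character scan that copies the first segment verbatim and, after the first separator, uppercases each word-start character and lowercases the rest.
import Mathlib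
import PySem

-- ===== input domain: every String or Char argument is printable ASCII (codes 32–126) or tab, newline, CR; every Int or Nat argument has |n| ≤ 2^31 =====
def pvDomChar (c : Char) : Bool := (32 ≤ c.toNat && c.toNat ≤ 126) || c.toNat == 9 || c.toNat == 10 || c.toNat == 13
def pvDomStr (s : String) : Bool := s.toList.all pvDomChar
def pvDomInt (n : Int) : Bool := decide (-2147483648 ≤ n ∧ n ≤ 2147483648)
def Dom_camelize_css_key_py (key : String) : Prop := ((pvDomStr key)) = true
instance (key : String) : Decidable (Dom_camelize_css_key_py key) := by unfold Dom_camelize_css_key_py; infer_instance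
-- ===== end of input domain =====

-- B replaces A's replace/split/capitalize/join pipeline by a single left-to-right
-- character scan with seen-separator and word-start flags (objective: alternative decomposition).

-- ===== PORT A =====
-- Python str.capitalize (first char upper-cased, rest lower-cased; exact on the ASCII domain)
def pyCapitalize (s : String) : String :=
  match s.toList with
  | [] => ""
  | c :: t => String.ofList (PySem.Chars.upperChar c :: t.map PySem.Chars.lowerChar)

def camelize_css_key_py (key : String) : String :=
  let sanitized := PySem.Str.replace key "_" "-"
  let parts := (PySem.Str.split? sanitized "-").getD []   -- sep "-" ≠ "", so split? is always some
  if parts.length = 1 then key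
  else ((PySem.List.pyGet? parts 0).getD "") ++
    PySem.Str.join "" (((parts.drop 1).filter (fun p => p ≠ "")).map pyCapitalize)

-- ===== PORT B =====
-- loop body of Source B: state = (out reversed, seen_sep, word_start)
def pvStep (st : List Char × Bool × Bool) (ch : Char) : List Char × Bool × Bool :=
  if ch == '-' || ch == '_' then (st.1, true, true)
  else if st.2.1 = false then (ch :: st.1, st.2.1, st.2.2)
  else if st.2.2 then (PySem.Chars.upperChar ch :: st.1, st.2.1, false)
  else (PySem.Chars.lowerChar ch :: st.1, st.2.1, st.2.2)

def camelize_css_key_py_alt (key : String) : String :=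
  if PySem.Str.isIn "-" key = false && PySem.Str.isIn "_" key = false then key
  else String.ofList (key.toList.foldl pvStep ([], false, false)).1.reverse

-- ===== PRECONDITION & SPEC =====
def Spec_camelize_css_key_py (key : String) (out : String) : Prop := out = camelize_css_key_py_alt key
instance (key : String) (out : String) : Decidable (Spec_camelize_css_key_py key out) := by unfold Spec_camelize_css_key_py; infer_instance

-- ===== CLAIM (what is proved, stated in full; the proofs are below) =====
def Claim_equal_camelize_css_key_py : Prop := ∀ (key : String), Dom_camelize_css_key_py key → Spec_camelize_css_key_py key (camelize_css_key_py key)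

-- ===== LEMMAS AND PROOFS =====

def pvIsSep (c : Char) : Bool := c == '-' || c == '_'
def pvSub (c : Char) : Char := if c = '_' then '-' else c

def pvSplitP : List Char → List (List Char)
  | [] => [[]]
  | c :: t => if pvIsSep c then [] :: pvSplitP t
              else (c :: (pvSplitP t).headI) :: (pvSplitP t).tail

def pvCapL : List Char → List Char
  | [] => []
  | c :: t => PySem.Chars.upperChar c :: t.map PySem.Chars.lowerChar

def pvJoinCaps (ps : List (List Char)) : List Char :=
  ((ps.filter (fun p => p ≠ [])).map pvCapL).flatten

def pvScanRest : Bool → List Char → List Char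
  | _, [] => []
  | ws, c :: t => if pvIsSep c then pvScanRest true t
                  else (if ws then PySem.Chars.upperChar c else PySem.Chars.lowerChar c) :: pvScanRest false t

def pvScan1 : List Char → List Char
  | [] => []
  | c :: t => if pvIsSep c then pvScanRest true t else c :: pvScan1 t

lemma pv_replace_go (fuel : Nat) : ∀ (l acc : List Char), l.length ≤ fuel →
    PySem.Chars.replace.go ['_'] ['-'] fuel l acc = acc.reverse ++ l.map pvSub := by
  induction fuel with
  | zero => intro l acc h
            cases l with
            | nil => simp [PySem.Chars.replace.go]
            | cons c t => simp at h
  | succ n ih =>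
    intro l acc h
    cases l with
    | nil => simp [PySem.Chars.replace.go]
    | cons c t =>
      rw [PySem.Chars.replace.go]
      by_cases hc : c = '_'
      · subst hc
        simp [List.isPrefixOf, pvSub, ih t _ (by simpa using h)]
      · simp [List.isPrefixOf, hc, pvSub, ih t _ (by simpa using h)]
        intro h'; exact absurd h'.symm hc

lemma pv_replace (l : List Char) :
    PySem.Chars.replace l ['_'] ['-'] = l.map pvSub := by
  rw [PySem.Chars.replace]
  simp only [List.isEmpty_cons, Bool.false_eq_true, if_false]
  simpa using pv_replace_go l.length l [] le_rfl

lemma pv_splitP_ne_nil (l : List Char) : pvSplitP l ≠ [] := by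
  cases l with
  | nil => simp [pvSplitP]
  | cons c t => simp only [pvSplitP]; split <;> simp

lemma pv_splitP_cons (l : List Char) : (pvSplitP l).headI :: (pvSplitP l).tail = pvSplitP l := by
  cases h : pvSplitP l with
  | nil => exact absurd h (pv_splitP_ne_nil l)
  | cons a as => simp

lemma pv_splitOn_go (fuel : Nat) : ∀ (l cur : List Char) (acc : List (List Char)), l.length < fuel →
    PySem.Chars.splitOn.go ['-'] fuel (l.map pvSub) cur acc
      = acc.reverse ++ ((cur.reverse ++ (pvSplitP l).headI) :: (pvSplitP l).tail) := by
  induction fuel with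
  | zero => intro l cur acc h; omega
  | succ n ih =>
    intro l cur acc h
    cases l with
    | nil => simp [PySem.Chars.splitOn.go, pvSplitP]
    | cons c t =>
      rw [List.map_cons, PySem.Chars.splitOn.go]
      by_cases hc : pvIsSep c = true
      · have hsub : pvSub c = '-' := by
          simp [pvIsSep] at hc
          rcases hc with hc | hc <;> simp [pvSub, hc]
        rw [hsub, if_pos (by simp [List.isPrefixOf])]
        simp only [List.length_cons, List.length_nil, List.drop_succ_cons, List.drop_zero]
        rw [ih t [] _ (by simpa using h)]
        simp [pvSplitP, hc, pv_splitP_cons]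
      · have h2 : ¬ (c = '-' ∨ c = '_') := by simpa [pvIsSep] using hc
        have hsub : pvSub c = c := by simp [pvSub]; intro h'; exact absurd (Or.inr h') h2
        rw [hsub, if_neg (by simp [List.isPrefixOf]; intro h'; exact absurd (Or.inl h'.symm) h2)]
        rw [ih t (c :: cur) _ (by simpa using h)]
        simp [pvSplitP, hc]

lemma pv_splitOn (l : List Char) :
    PySem.Chars.splitOn (l.map pvSub) ['-'] = pvSplitP l := by
  rw [PySem.Chars.splitOn]
  rw [pv_splitOn_go ((l.map pvSub).length + 1) l [] [] (by simp)]
  simpa using pv_splitP_cons l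

lemma pv_len_one_iff (l : List Char) :
    (pvSplitP l).length = 1 ↔ ∀ c ∈ l, pvIsSep c = false := by
  induction l with
  | nil => simp [pvSplitP]
  | cons c t ih =>
    by_cases hc : pvIsSep c = true
    · simp only [pvSplitP, hc, if_true]
      constructor
      · intro h
        simp only [List.length_cons, Nat.add_eq_right] at h
        exact absurd (List.length_eq_zero_iff.mp h) (pv_splitP_ne_nil t)
      · intro h; exact absurd (h c (by simp)) (by simp [hc])
    · have hc' : pvIsSep c = false := by simpa using hc
      simp only [pvSplitP, hc']
      cases ht : pvSplitP t with
      | nil => exact absurd ht (pv_splitP_ne_nil t)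
      | cons a as =>
        rw [ht] at ih
        simp only [List.length_cons] at ih
        simp [hc', ← ih]

lemma pv_noSep_scan1 (l : List Char) (h : ∀ c ∈ l, pvIsSep c = false) : pvScan1 l = l := by
  induction l with
  | nil => rfl
  | cons c t ih =>
    have := h c (by simp)
    simp [pvScan1, this, ih (fun d hd => h d (by simp [hd]))]

lemma pv_scanRest_eq (t : List Char) :
    pvScanRest true t = pvJoinCaps (pvSplitP t) ∧
    pvScanRest false t = (pvSplitP t).headI.map PySem.Chars.lowerChar ++ pvJoinCaps (pvSplitP t).tail := by
  induction t with
  | nil => simp [pvScanRest, pvSplitP, pvJoinCaps]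
  | cons c t ih =>
    by_cases hc : pvIsSep c = true
    · simp only [pvScanRest, pvSplitP, hc, if_true]
      refine ⟨ih.1, ?_⟩
      simp [pvJoinCaps, ih.1]
    · have hc' : pvIsSep c = false := by simpa using hc
      cases ht : pvSplitP t with
      | nil => exact absurd ht (pv_splitP_ne_nil t)
      | cons a as =>
        rw [ht] at ih
        constructor
        · simp only [pvScanRest, pvSplitP, hc', ht]
          rw [ih.2]
          simp [pvJoinCaps, pvCapL]
        · simp only [pvScanRest, pvSplitP, hc', ht]
          rw [ih.2]
          simp

lemma pv_scan1_eq (l : List Char) :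
    pvScan1 l = (pvSplitP l).headI ++ pvJoinCaps (pvSplitP l).tail := by
  induction l with
  | nil => simp [pvScan1, pvSplitP, pvJoinCaps]
  | cons c t ih =>
    by_cases hc : pvIsSep c = true
    · simp only [pvScan1, pvSplitP, hc, if_true]
      simpa using (pv_scanRest_eq t).1
    · have hc' : pvIsSep c = false := by simpa using hc
      cases ht : pvSplitP t with
      | nil => exact absurd ht (pv_splitP_ne_nil t)
      | cons a as =>
        rw [ht] at ih
        simp only [pvScan1, pvSplitP, hc', ht]
        simp [ih]

lemma pv_foldl (cs : List Char) : ∀ (out : List Char),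
    ((cs.foldl pvStep (out, false, false)).1).reverse = out.reverse ++ pvScan1 cs ∧
    ∀ ws, ((cs.foldl pvStep (out, true, ws)).1).reverse = out.reverse ++ pvScanRest ws cs := by
  induction cs with
  | nil => intro out; simp [pvScan1, pvScanRest]
  | cons c t ih =>
    intro out
    by_cases hc : pvIsSep c = true
    · have hb : (c == '-' || c == '_') = true := hc
      have e1 : pvStep (out, false, false) c = (out, true, true) := by simp [pvStep, hb]
      have e2 : ∀ ws, pvStep (out, true, ws) c = (out, true, true) := by intro ws; simp [pvStep, hb]
      refine ⟨?_, ?_⟩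
      · rw [List.foldl_cons, e1, (ih out).2 true]
        simp [pvScan1, hc]
      · intro ws
        rw [List.foldl_cons, e2 ws, (ih out).2 true]
        simp [pvScanRest, hc]
    · have hb : (c == '-' || c == '_') = false := by simpa [pvIsSep] using hc
      have hc2 : pvIsSep c = false := by simpa using hc
      refine ⟨?_, ?_⟩
      · have e : pvStep (out, false, false) c = (c :: out, false, false) := by simp [pvStep, hb]
        rw [List.foldl_cons, e, (ih (c :: out)).1]
        simp [pvScan1, hc2]
      · intro ws
        cases ws with
        | true =>
          have e : pvStep (out, true, true) c = (PySem.Chars.upperChar c :: out, true, false) := by simp [pvStep, hb]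
          rw [List.foldl_cons, e, (ih (PySem.Chars.upperChar c :: out)).2 false]
          simp [pvScanRest, hc2]
        | false =>
          have e : pvStep (out, true, false) c = (PySem.Chars.lowerChar c :: out, true, false) := by simp [pvStep, hb]
          rw [List.foldl_cons, e, (ih (PySem.Chars.lowerChar c :: out)).2 false]
          simp [pvScanRest, hc2]

lemma pv_mem_iff (cs : List Char) :
    (PySem.Chars.isIn ['-'] cs = false ∧ PySem.Chars.isIn ['_'] cs = false) ↔ (∀ c ∈ cs, pvIsSep c = false) := by
  have hsing : ∀ (a : Char), ([a] <:+: cs ↔ a ∈ cs) := by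
    intro a
    constructor
    · rintro ⟨s, t, h⟩; subst h; simp
    · intro h
      obtain ⟨s, t, h⟩ := List.append_of_mem h
      exact ⟨s, t, by simp [h]⟩
  rw [PySem.Chars.isIn_eq_false_iff, PySem.Chars.isIn_eq_false_iff, hsing, hsing]
  constructor
  · rintro ⟨h1, h2⟩ c hc
    simp [pvIsSep]
    constructor
    · rintro rfl; exact h1 hc
    · rintro rfl; exact h2 hc
  · intro h
    constructor
    · intro hm; have := h _ hm; simp [pvIsSep] at this
    · intro hm; have := h _ hm; simp [pvIsSep] at this

lemma pv_join_flatten (ls : List (List Char)) : PySem.Chars.join [] ls = ls.flatten := by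
  induction ls with
  | nil => simp [PySem.Chars.join_nil]
  | cons p rest ih =>
    cases rest with
    | nil => simp [PySem.Chars.join_singleton]
    | cons q r => rw [PySem.Chars.join_cons_cons, ih]; simp

lemma pv_cap_ofList (p : List Char) : pyCapitalize (String.ofList p) = String.ofList (pvCapL p) := by
  cases p with
  | nil => rfl
  | cons c t => simp [pyCapitalize, pvCapL]

lemma pv_A_eq (key : String) : camelize_css_key_py key = String.ofList (pvScan1 key.toList) := by
  simp only [camelize_css_key_py]
  have hsan : (PySem.Str.replace key "_" "-").toList = key.toList.map pvSub := by
    rw [PySem.Str.toList_replace]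
    exact pv_replace key.toList
  have hparts : (PySem.Str.split? (PySem.Str.replace key "_" "-") "-").getD []
      = (pvSplitP key.toList).map String.ofList := by
    rw [PySem.Str.split?]
    rw [PySem.Chars.split?]
    rw [if_neg (by simp)]
    have hdash : ("-" : String).toList = ['-'] := rfl
    rw [hsan, hdash, pv_splitOn]
    rfl
  rw [hparts]
  cases hsp : pvSplitP key.toList with
  | nil => exact absurd hsp (pv_splitP_ne_nil key.toList)
  | cons h0 rest =>
    by_cases hlen : ((h0 :: rest).map String.ofList).length = 1
    · rw [if_pos hlen]
      have hno : ∀ c ∈ key.toList, pvIsSep c = false := by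
        rw [← pv_len_one_iff, hsp]; simpa using hlen
      rw [pv_noSep_scan1 key.toList hno, String.ofList_toList]
    · rw [if_neg hlen]
      have hget : (PySem.List.pyGet? ((h0 :: rest).map String.ofList) 0).getD "" = String.ofList h0 := by
        simp [PySem.List.pyGet?, PySem.List.pyIdx?]
      rw [hget]
      have hdrop : ((h0 :: rest).map String.ofList).drop 1 = rest.map String.ofList := by simp
      rw [hdrop]
      have hfil : (rest.map String.ofList).filter (fun p => p ≠ "")
          = (rest.filter (fun p => p ≠ [])).map String.ofList := by
        rw [List.filter_map]
        congr 1
        apply List.filter_congr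
        intro p _
        by_cases hp : p = []
        · subst hp; simp
        · have hne : String.ofList p ≠ "" := fun h => hp (by simpa using congrArg String.toList h)
          simp [hp, hne]
      rw [hfil]
      have hmap : ((rest.filter (fun p => p ≠ [])).map String.ofList).map pyCapitalize
          = ((rest.filter (fun p => p ≠ [])).map pvCapL).map String.ofList := by
        simp only [List.map_map]
        apply List.map_congr_left
        intro p _
        exact pv_cap_ofList p
      rw [hmap]
      have hjoin : PySem.Str.join "" (((rest.filter (fun p => p ≠ [])).map pvCapL).map String.ofList)
          = String.ofList (pvJoinCaps rest) := by
        have ht : (PySem.Str.join "" (((rest.filter (fun p => p ≠ [])).map pvCapL).map String.ofList)).toList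
            = pvJoinCaps rest := by
          rw [PySem.Str.toList_join]
          have : ("" : String).toList = [] := rfl
          rw [this]
          rw [pv_join_flatten]
          simp [pvJoinCaps, List.map_map, Function.comp_def]
        exact (String.ofList_toList).symm.trans (congrArg String.ofList ht)
      rw [hjoin]
      rw [pv_scan1_eq, hsp]
      simp

lemma pv_B_eq (key : String) : camelize_css_key_py_alt key = String.ofList (pvScan1 key.toList) := by
  unfold camelize_css_key_py_alt
  by_cases hg : (PySem.Str.isIn "-" key = false && PySem.Str.isIn "_" key = false) = true
  · rw [if_pos hg]
    simp only [Bool.and_eq_true] at hg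
    have h1 : PySem.Chars.isIn ['-'] key.toList = false := by
      simpa using hg.1
    have h2 : PySem.Chars.isIn ['_'] key.toList = false := by
      have := hg.2; simpa using this
    have hno := (pv_mem_iff key.toList).mp ⟨h1, h2⟩
    rw [pv_noSep_scan1 key.toList hno, String.ofList_toList]
  · rw [if_neg hg]
    congr 1
    have := (pv_foldl key.toList []).1
    simpa using this

-- ===== VERDICT (by name: the statement is the Claim_ definition above) =====
theorem camelize_css_key_py_spec : Claim_equal_camelize_css_key_py := by
  intro key _
  unfold Spec_camelize_css_key_py
  rw [pv_A_eq, pv_B_eq]
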